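-- pv_equiv track=rewrite | github.com/B-Renan/Study_Project-GameOfLife | RLE_parser.py | content_to_coordinates
-- ===== SOURCE A (Python) =====
-- def content_to_coordinates(content):
--     """
--         Function that converts a string to a list of coordinates (of alive cells)
--         Input :
--             * content -> string, b -> dead cell, o -> alive cell, $ -> end of line, ! -> end of content
--         Output :
--             * list of 2-uple, the coordinates of the alive cells (line, column)
--         Example :
--             "11b2o$2bo9bo!" -> [(0,11), (0,12), (1,2), ...]
--
--     """
--     cells = []
--     l, c = 0, 0
--     j = 0
--
--     while j < len(content):
--         # On détermine le nombre qui précède le caractère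
--         nombre = ""
--         while content[j].isdigit(): # Tant que c’est un chiffre (et donc pas un caractère)
--             nombre = nombre + content[j]
--             j += 1
--         if nombre == "":
--             nombre = 1
--         else:
--             nombre = int(nombre)
--
--         # On traite chaque caractère comme un cas différent
--         if content[j] == "b":
--             c += nombre
--
--         elif content[j] == "o":
--             for _ in range(nombre):
--                 cells.append((l, c))
--                 c += 1
--
--         elif content[j] == "$":
--             c = 0
--             l = l+nombre
--
--         # On avance dans la chaine de caractère
--         j = j + 1
--
--     return cells
-- ===== SOURCE B (Python) =====
-- def content_to_coordinates(content):
--     """Two-phase version: tokenize into (count, char) pairs, then execute the tokens."""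
--     # Phase 1: tokenize.  The content[k] read is a real indexing so a string
--     # ending in digits raises IndexError, like the in-place parser would.
--     tokens = []
--     j = 0
--     n = len(content)
--     while j < n:
--         k = j
--         while k < n and content[k].isdigit():
--             k += 1
--         count = int(content[j:k]) if k > j else 1
--         ch = content[k]
--         tokens.append((count, ch))
--         j = k + 1
--     # Phase 2: execute.
--     cells = []
--     l, c = 0, 0
--     for count, ch in tokens:
--         if ch == 'b':
--             c += count
--         elif ch == 'o':
--             cells.extend((l, c + i) for i in range(count))
--             c += count
--         elif ch == '$':
--             l += count
--             c = 0
--     return cells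
-- ===== Notes on version B (the rewrite author's own statement) =====
-- stated objective: alternative
-- what changed: A interleaves digit parsing and cell emission in one index-driven while loop with an in-place appending accumulator; B first tokenizes the string into (count, char) pairs and then executes the token list, emitting each run of alive cells as a range comprehension and building the output by concatenation.
import Mathlib
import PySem

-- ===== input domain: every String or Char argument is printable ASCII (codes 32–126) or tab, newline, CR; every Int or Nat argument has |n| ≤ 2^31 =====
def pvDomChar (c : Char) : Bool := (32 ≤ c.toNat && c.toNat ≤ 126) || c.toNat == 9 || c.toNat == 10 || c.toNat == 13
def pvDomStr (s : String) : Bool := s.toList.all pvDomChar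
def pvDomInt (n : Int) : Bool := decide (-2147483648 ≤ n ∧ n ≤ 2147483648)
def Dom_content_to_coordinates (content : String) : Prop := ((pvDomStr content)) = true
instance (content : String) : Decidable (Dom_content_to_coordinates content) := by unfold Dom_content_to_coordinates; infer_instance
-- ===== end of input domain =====

-- B re-implements A's single interleaved parse loop as a tokenize-then-execute pipeline
-- (same cost, different decomposition); equality of return values is proved on all inputs
-- where the Python A returns (Pre_ excludes the strings on which it raises IndexError).

-- ===== PORT A =====
-- inner `while content[j].isdigit()` loop: accumulates the digit characters into `nombre`;
-- returns (nombre, remaining characters); Python raises IndexError when this scan runs off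
-- the end of the string — the (acc, []) outcome here (excluded by Pre_).
def pvAScanNum : List Char → List Char → List Char × List Char
  | [], nombre => (nombre, [])
  | ch :: rest, nombre =>
    if ch.isDigit then pvAScanNum rest (nombre ++ [ch]) else (nombre, ch :: rest)

-- `if nombre == "": nombre = 1 else: nombre = int(nombre)`; int() on a string = ofChars?
def pvANombre (nombre : List Char) : Int :=
  if nombre = [] then 1 else (PySem.Int.ofChars? nombre).getD 0

-- `for _ in range(nombre): cells.append((l, c)); c += 1`
def pvAEmit : Nat → Int → Int → List (Int × Int) → List (Int × Int) × Int
  | 0, _, c, cells => (cells, c)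
  | n + 1, l, c, cells => pvAEmit n l (c + 1) (cells ++ [(l, c)])

-- the outer `while j < len(content)` loop of A (state: remaining suffix, l, c, cells);
-- the fuel argument only makes the recursion structural: one character at least is
-- consumed per step, so fuel = length of the string never runs out.
def pvALoop : Nat → List Char → Int → Int → List (Int × Int) → List (Int × Int)
  | 0, _, _, _, cells => cells
  | fuel + 1, cs, l, c, cells =>
    match cs with
    | [] => cells
    | ch0 :: rest0 =>
      let p := pvAScanNum (ch0 :: rest0) []
      let nombre := pvANombre p.1
      match p.2 with
      | [] => cells      -- Python: IndexError (string ends in digits); outside Pre_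
      | ch :: rest =>
        if ch = 'b' then pvALoop fuel rest l (c + nombre) cells
        else if ch = 'o' then
          let e := pvAEmit nombre.toNat l c cells
          pvALoop fuel rest l e.2 e.1
        else if ch = '$' then pvALoop fuel rest (l + nombre) 0 cells
        else pvALoop fuel rest l c cells

def content_to_coordinates (content : String) : List (Int × Int) :=
  pvALoop content.toList.length content.toList 0 0 []

-- ===== PORT B =====
-- B phase 1 inner while: split off the leading digit run
def pvBSpan : List Char → List Char × List Char
  | [] => ([], [])
  | ch :: rest =>
    if ch.isDigit then
      let p := pvBSpan rest
      (ch :: p.1, p.2)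
    else ([], ch :: rest)

-- B phase 1: the token list [(count, ch), …]; fuel as above, only to make the recursion structural
def pvBTok : Nat → List Char → List (Int × Char)
  | 0, _ => []
  | fuel + 1, cs =>
    match cs with
    | [] => []
    | ch0 :: rest0 =>
      let p := pvBSpan (ch0 :: rest0)
      let count : Int := if p.1 = [] then 1 else (PySem.Int.ofChars? p.1).getD 0
      match p.2 with
      | [] => []       -- Python: `content[k]` raises IndexError; outside Pre_
      | ch :: rest => (count, ch) :: pvBTok fuel rest

-- `cells.extend((l, c + i) for i in range(count))`
def pvBRow (l c count : Int) : List (Int × Int) :=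
  (PySem.List.pyRange 0 count 1).map (fun i => (l, c + i))

-- B phase 2: execute the tokens
def pvBExec : List (Int × Char) → Int → Int → List (Int × Int)
  | [], _, _ => []
  | (count, ch) :: ts, l, c =>
    if ch = 'b' then pvBExec ts l (c + count)
    else if ch = 'o' then pvBRow l c count ++ pvBExec ts l (c + count)
    else if ch = '$' then pvBExec ts (l + count) 0
    else pvBExec ts l c

def content_to_coordinates_alt (content : String) : List (Int × Int) :=
  pvBExec (pvBTok content.toList.length content.toList) 0 0

-- ===== PRECONDITION & SPEC =====
-- Pre_ excludes exactly the strings ending in a digit: there A's inner digit scan reads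
-- content[j] with j = len(content) and raises IndexError (B raises there too).
def Pre_content_to_coordinates (content : String) : Prop :=
  (content.toList.getLast?.all (fun ch => !ch.isDigit)) = true
instance (content : String) : Decidable (Pre_content_to_coordinates content) := by
  unfold Pre_content_to_coordinates; infer_instance

def pvWitness_content_to_coordinates : String := "11b2o$2bo!"

def Spec_content_to_coordinates (content : String) (out : List (Int × Int)) : Prop := out = content_to_coordinates_alt content
instance (content : String) (out : List (Int × Int)) : Decidable (Spec_content_to_coordinates content out) := by unfold Spec_content_to_coordinates; infer_instance

-- ===== CLAIM (what is proved, stated in full; the proofs are below) =====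
def Claim_equal_content_to_coordinates : Prop := ∀ (content : String), Dom_content_to_coordinates content → Pre_content_to_coordinates content → Spec_content_to_coordinates content (content_to_coordinates content)

-- ===== LEMMAS AND PROOFS =====

-- A's accumulating digit scan is B's span with the accumulator in front
theorem pvAScanNum_eq_span (cs acc : List Char) :
    pvAScanNum cs acc = (acc ++ (pvBSpan cs).1, (pvBSpan cs).2) := by
  induction cs generalizing acc with
  | nil => simp [pvAScanNum, pvBSpan]
  | cons ch rest ih =>
    simp only [pvAScanNum, pvBSpan]
    split
    · simp [ih]
    · simp

theorem pvBSpan_append (cs : List Char) : (pvBSpan cs).1 ++ (pvBSpan cs).2 = cs := by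
  induction cs with
  | nil => simp [pvBSpan]
  | cons ch rest ih =>
    simp only [pvBSpan]
    split
    · simp [ih]
    · simp

theorem pvBSpan_fst_digits (cs : List Char) : ∀ d ∈ (pvBSpan cs).1, d.isDigit = true := by
  induction cs with
  | nil => simp [pvBSpan]
  | cons ch rest ih =>
    simp only [pvBSpan]
    split
    · next h => intro d hd; cases hd with
      | head => exact h
      | tail _ hd' => exact ih d hd'
    · simp

theorem pvBSpan_snd_length (cs : List Char) : (pvBSpan cs).2.length ≤ cs.length := by
  induction cs with
  | nil => simp [pvBSpan]
  | cons ch rest ih =>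
    simp only [pvBSpan]
    split
    · exact Nat.le_trans ih (by simp)
    · simp

theorem pv_opt_nonneg (o : Option ℕ) :
    0 ≤ (Option.map (fun n : ℤ => n) (o >>= fun a => pure (↑a : ℤ))).getD 0 := by
  cases o <;> simp

theorem pv_isIntSpace_of_digit (d : Char) (h : d.isDigit = true) :
    PySem.Int.isIntSpace d = false := by
  revert h
  simp [PySem.Int.isIntSpace, Char.isDigit, Char.ext_iff, UInt32.le_iff_toNat_le, UInt32.ext_iff]
  omega

theorem pv_dropWhile_digits (ds : List Char) (h : ∀ d ∈ ds, d.isDigit = true) :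
    ds.dropWhile PySem.Int.isIntSpace = ds := by
  cases ds with
  | nil => simp
  | cons d tl =>
    rw [List.dropWhile_cons_of_neg]
    simp [pv_isIntSpace_of_digit d (h d (by simp))]

theorem pv_ofChars_digits_nonneg (ds : List Char) (hne : ds ≠ [])
    (h : ∀ d ∈ ds, d.isDigit = true) : 0 ≤ (PySem.Int.ofChars? ds).getD 0 := by
  simp only [PySem.Int.ofChars?]
  rw [pv_dropWhile_digits ds h,
      pv_dropWhile_digits ds.reverse (by intro d hd; exact h d (List.mem_reverse.mp hd)),
      List.reverse_reverse]
  cases ds with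
  | nil => exact absurd rfl hne
  | cons d tl =>
    have hd : d.isDigit = true := h d (by simp)
    have h1 : d ≠ '-' := by rintro rfl; simp [Char.isDigit] at hd
    have h2 : d ≠ '+' := by rintro rfl; simp [Char.isDigit] at hd
    split
    · next heq => exact absurd (by simpa using congrArg List.head? heq) h1
    · next heq => exact absurd (by simpa using congrArg List.head? heq) h2
    · exact pv_opt_nonneg _

theorem pvANombre_nonneg (cs : List Char) : 0 ≤ pvANombre (pvBSpan cs).1 := by
  unfold pvANombre
  split
  · norm_num
  · next h => exact pv_ofChars_digits_nonneg _ h (pvBSpan_fst_digits cs)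

theorem pvAEmit_eq (n : Nat) (l c : Int) (cells : List (Int × Int)) :
    pvAEmit n l c cells = (cells ++ (List.range n).map (fun i : Nat => (l, c + (i : Int))), c + n) := by
  induction n generalizing c cells with
  | zero => simp [pvAEmit]
  | succ k ih =>
    rw [pvAEmit, ih, List.range_succ_eq_map]
    simp only [List.map_cons, List.map_map, List.append_assoc,
      List.cons_append, List.nil_append, Prod.mk.injEq, Nat.cast_zero, add_zero]
    refine ⟨congrArg _ (congrArg _ ?_), by push_cast; ring⟩
    apply List.map_congr_left
    intro i _
    simp only [Function.comp_apply, Prod.mk.injEq, true_and]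
    push_cast
    ring

theorem pvBRow_eq (l c count : Int) :
    pvBRow l c count = (List.range count.toNat).map (fun i : Nat => (l, c + (i : Int))) := by
  unfold pvBRow
  rw [PySem.List.pyRange_one]
  simp [List.map_map, Function.comp]

-- no-trailing-digit state transfers to the characters after a token
theorem pv_noTrail_rest (pre : List Char) (ch : Char) (rest : List Char)
    (hnt : (pre ++ ch :: rest).getLast?.all (fun c => !c.isDigit) = true) :
    rest.getLast?.all (fun c => !c.isDigit) = true := by
  cases rest with
  | nil => simp
  | cons r rs =>
    rw [List.getLast?_append_of_ne_nil pre (by simp), List.getLast?_cons_cons] at hnt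
    exact hnt

theorem pvBSpan_snd_ne_nil (cs : List Char) (hne : cs ≠ [])
    (hnt : cs.getLast?.all (fun c => !c.isDigit) = true) : (pvBSpan cs).2 ≠ [] := by
  intro hnil
  have happ := pvBSpan_append cs
  rw [hnil, List.append_nil] at happ
  have h1 : (pvBSpan cs).1 ≠ [] := by rw [happ]; exact hne
  have hd := List.getLast?_eq_getLast_of_ne_nil hne
  have hdig : (cs.getLast hne).isDigit = true := by
    apply pvBSpan_fst_digits cs
    rw [happ]
    exact List.getLast_mem hne
  rw [hd] at hnt
  simp [hdig] at hnt

-- main invariant: A's loop = cells so far ++ B's pipeline on the suffix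
theorem pv_main (fuel : Nat) : ∀ (cs : List Char), cs.length ≤ fuel →
    cs.getLast?.all (fun c => !c.isDigit) = true →
    ∀ (l c : Int) (cells : List (Int × Int)),
      pvALoop fuel cs l c cells = cells ++ pvBExec (pvBTok fuel cs) l c := by
  induction fuel with
  | zero =>
    intro cs hlen _ l c cells
    have : cs = [] := List.eq_nil_of_length_eq_zero (Nat.le_zero.mp hlen)
    subst this
    simp [pvALoop, pvBTok, pvBExec]
  | succ fuel ih =>
    intro cs hlen hnt l c cells
    cases cs with
    | nil => simp [pvALoop, pvBTok, pvBExec]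
    | cons ch0 rest0 =>
      obtain ⟨ch, rest, hp⟩ :
          ∃ ch rest, (pvBSpan (ch0 :: rest0)).2 = ch :: rest := by
        rcases h' : (pvBSpan (ch0 :: rest0)).2 with _ | ⟨a, b⟩
        · exact absurd h' (pvBSpan_snd_ne_nil _ (by simp) hnt)
        · exact ⟨a, b, rfl⟩
      have hlen' : rest.length ≤ fuel := by
        have h1 := pvBSpan_snd_length (ch0 :: rest0)
        rw [hp] at h1
        simp at h1 hlen
        omega
      have hnt' : rest.getLast?.all (fun c => !c.isDigit) = true := by
        have happ := pvBSpan_append (ch0 :: rest0)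
        rw [hp] at happ
        rw [← happ] at hnt
        exact pv_noTrail_rest _ _ _ hnt
      simp only [pvALoop, pvBTok, pvAScanNum_eq_span, List.nil_append, hp, pvBExec]
      have hc : (if (pvBSpan (ch0 :: rest0)).1 = [] then (1 : Int)
          else (PySem.Int.ofChars? (pvBSpan (ch0 :: rest0)).1).getD 0)
          = pvANombre (pvBSpan (ch0 :: rest0)).1 := rfl
      rw [hc]
      by_cases hb : ch = 'b'
      · simp only [hb, if_pos]
        exact ih rest hlen' hnt' l (c + pvANombre (pvBSpan (ch0 :: rest0)).1) cells
      · by_cases ho : ch = 'o'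
        · simp only [ho, if_pos]
          rw [pvAEmit_eq, ih rest hlen' hnt',
              pvBRow_eq l c _,
              Int.toNat_of_nonneg (pvANombre_nonneg (ch0 :: rest0))]
          rw [ih rest hlen' hnt']
          simp
        · by_cases hd : ch = '$'
          · simp only [hd, if_pos]
            exact ih rest hlen' hnt' (l + pvANombre (pvBSpan (ch0 :: rest0)).1) 0 cells
          · simp only [hb, ho, hd, if_false]
            exact ih rest hlen' hnt' l c cells

-- ===== VERDICT (by name: the statement is the Claim_ definition above) =====
theorem content_to_coordinates_spec : Claim_equal_content_to_coordinates := by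
  intro content _ hpre
  unfold Spec_content_to_coordinates content_to_coordinates content_to_coordinates_alt
  simpa using pv_main content.toList.length content.toList le_rfl hpre 0 0 []
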